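-- pv_equiv track=rewrite | github.com/VASANTH-KUMAR23/Strivers_SDE_Sheet-Challenge | Make Matrix Beautiful - GFG/make-matrix-beautiful.py | findMinOpeartion
-- ===== SOURCE A (Python) =====
-- def findMinOpeartion(matrix, n):
--     # Code here
--     sum_row = [0]*n
--     col_sum = [0]*n
--     temp = 0
--
--     for i in range(n):
--         for j in range(n):
--             sum_row[i] += matrix[i][j]
--             col_sum[i] += matrix[j][i]
--         if temp < col_sum[i] or temp < sum_row[i]:
--             temp = max(col_sum[i],sum_row[i])
--
--     ans = 0
--     for i in range(n):
--         ans += temp-col_sum[i]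
--     return ans
-- ===== SOURCE B (Python) =====
-- def findMinOpeartion(matrix, n):
--     # Online single pass: keep the answer for the columns seen so far and
--     # re-charge them whenever a larger target sum appears.
--     target = 0   # largest line sum seen so far (lines start at sum 0)
--     ops = 0      # increments already charged to the processed columns
--     done = 0     # number of columns processed so far
--     for i in range(n):
--         r = c = 0
--         for j in range(n):
--             r += matrix[i][j]
--             c += matrix[j][i]
--         m = r if r > c else c
--         if m > target:
--             ops += done * (m - target)   # lift earlier columns to the new target
--             target = m
--         ops += target - c
--         done += 1
--     return ops
-- ===== Notes on version B (the rewrite author's own statement) =====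
-- stated objective: alternative
-- what changed: Replaces A's two-phase scheme (accumulate row/col sums and a running max, then a second loop summing temp-col_sum[i]) by a single online pass that maintains the final answer incrementally: each step charges the current column up to the running target and, when a new larger target appears, re-charges all previously processed columns by done*(m-target); no second pass and no closed form.
import Mathlib
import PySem

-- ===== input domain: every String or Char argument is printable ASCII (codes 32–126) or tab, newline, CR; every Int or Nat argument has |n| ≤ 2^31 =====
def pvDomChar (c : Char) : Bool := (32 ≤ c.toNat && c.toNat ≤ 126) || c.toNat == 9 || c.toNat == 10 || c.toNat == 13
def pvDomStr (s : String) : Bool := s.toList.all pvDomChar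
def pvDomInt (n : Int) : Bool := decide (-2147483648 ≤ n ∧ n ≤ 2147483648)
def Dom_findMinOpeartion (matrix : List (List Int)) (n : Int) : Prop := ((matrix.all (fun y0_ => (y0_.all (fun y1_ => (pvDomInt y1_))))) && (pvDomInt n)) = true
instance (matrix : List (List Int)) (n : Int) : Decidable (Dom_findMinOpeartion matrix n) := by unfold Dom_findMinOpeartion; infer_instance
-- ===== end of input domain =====

-- B replaces A's two-phase scheme (accumulate sums + running max, then a second
-- difference-summing loop) by one online pass that keeps the answer incrementally,
-- re-charging already-processed columns when a larger target appears (objective: alternative).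

-- ===== PORT A =====
-- body of A's inner 'for j in range(n)' loop: sum_row[i] += matrix[i][j]; col_sum[i] += matrix[j][i]
def pvInnerA (matrix : List (List Int)) (i : Int) (p : List Int × List Int) (j : Int) : List Int × List Int :=
  (PySem.List.pySetD p.1 i (PySem.List.pyGetD p.1 i 0 +
     PySem.List.pyGetD (PySem.List.pyGetD matrix i []) j 0),
   PySem.List.pySetD p.2 i (PySem.List.pyGetD p.2 i 0 +
     PySem.List.pyGetD (PySem.List.pyGetD matrix j []) i 0))

-- body of A's outer 'for i in range(n)' loop, state = (sum_row, col_sum, temp)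
def pvOuterA (matrix : List (List Int)) (n : Int) (st : List Int × List Int × Int) (i : Int) :
    List Int × List Int × Int :=
  let inner := (PySem.List.pyRange 0 n 1).foldl (pvInnerA matrix i) (st.1, st.2.1)
  let temp := if st.2.2 < PySem.List.pyGetD inner.2 i 0 ∨ st.2.2 < PySem.List.pyGetD inner.1 i 0
              then max (PySem.List.pyGetD inner.2 i 0) (PySem.List.pyGetD inner.1 i 0) else st.2.2
  (inner.1, inner.2, temp)

def findMinOpeartion (matrix : List (List Int)) (n : Int) : Int :=
  -- sum_row = [0]*n ; col_sum = [0]*n ; temp = 0 ; the two loops; then ans accumulation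
  let st := (PySem.List.pyRange 0 n 1).foldl (pvOuterA matrix n)
    (List.replicate n.toNat 0, List.replicate n.toNat 0, 0)
  (PySem.List.pyRange 0 n 1).foldl (fun ans i => ans + (st.2.2 - PySem.List.pyGetD st.2.1 i 0)) 0

-- ===== PORT B =====
-- body of B's 'for i in range(n)' loop, state = (target, ops, done)
def pvStepB (matrix : List (List Int)) (n : Int) (st : Int × Int × Int) (i : Int) :
    Int × Int × Int :=
  let rc := (PySem.List.pyRange 0 n 1).foldl (fun (p : Int × Int) j =>
    (p.1 + PySem.List.pyGetD (PySem.List.pyGetD matrix i []) j 0,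
     p.2 + PySem.List.pyGetD (PySem.List.pyGetD matrix j []) i 0)) (0, 0)
  let m := if rc.1 > rc.2 then rc.1 else rc.2
  let target := if m > st.1 then m else st.1
  let ops := if m > st.1 then st.2.1 + st.2.2 * (m - st.1) else st.2.1
  (target, ops + (target - rc.2), st.2.2 + 1)

def findMinOpeartion_alt (matrix : List (List Int)) (n : Int) : Int :=
  ((PySem.List.pyRange 0 n 1).foldl (pvStepB matrix n) (0, 0, 0)).2.1

-- ===== PRECONDITION & SPEC =====
-- Pre_ excludes exactly the inputs where the Python A raises IndexError:
-- n exceeding the number of rows, or one of the first n rows shorter than n.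
def Pre_findMinOpeartion (matrix : List (List Int)) (n : Int) : Prop :=
  n ≤ (matrix.length : Int) ∧ ∀ row ∈ matrix.take n.toNat, n ≤ (row.length : Int)
instance (matrix : List (List Int)) (n : Int) : Decidable (Pre_findMinOpeartion matrix n) := by unfold Pre_findMinOpeartion; infer_instance
def pvWitness_findMinOpeartion : List (List Int) × Int := ([[1, 2], [3, 4]], 2)
def Spec_findMinOpeartion (matrix : List (List Int)) (n : Int) (out : Int) : Prop := out = findMinOpeartion_alt matrix n
instance (matrix : List (List Int)) (n : Int) (out : Int) : Decidable (Spec_findMinOpeartion matrix n out) := by unfold Spec_findMinOpeartion; infer_instance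

-- ===== CLAIM (what is proved, stated in full; the proofs are below) =====
def Claim_equal_findMinOpeartion : Prop := ∀ (matrix : List (List Int)) (n : Int), Dom_findMinOpeartion matrix n → Pre_findMinOpeartion matrix n → Spec_findMinOpeartion matrix n (findMinOpeartion matrix n)

-- ===== LEMMAS AND PROOFS =====

-- matrix[i][j] read through defaults (equal to the real entry whenever in range)
def pvE (m : List (List Int)) (i j : Nat) : Int :=
  PySem.List.pyGetD (PySem.List.pyGetD m (i : Int) []) (j : Int) 0
-- row- and column-sums of the leading N×N block
def pvR (m : List (List Int)) (N i : Nat) : Int := ((List.range N).map (fun j => pvE m i j)).sum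
def pvC (m : List (List Int)) (N i : Nat) : Int := ((List.range N).map (fun j => pvE m j i)).sum
-- sum of the first k column sums
def pvS (m : List (List Int)) (N k : Nat) : Int := ((List.range k).map (pvC m N)).sum
-- A's accumulator lists after k outer iterations
def pvVec (N : Nat) (f : Nat → Int) (k : Nat) : List Int :=
  (List.range N).map (fun t => if t < k then f t else 0)
-- A's temp after k outer iterations
def pvT (m : List (List Int)) (N : Nat) : Nat → Int
  | 0 => 0
  | k+1 => if pvT m N k < pvC m N k ∨ pvT m N k < pvR m N k
           then max (pvC m N k) (pvR m N k) else pvT m N k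

theorem pvVec_length (N : Nat) (f : Nat → Int) (k : Nat) : (pvVec N f k).length = N := by
  simp [pvVec]

theorem pvVec_zero (N : Nat) (f : Nat → Int) : pvVec N f 0 = List.replicate N 0 := by
  simp [pvVec, List.map_const']

theorem pvVec_set_zero (N : Nat) (f : Nat → Int) (k : Nat) (_hk : k < N) :
    (pvVec N f k).set k 0 = pvVec N f k := by
  apply List.ext_getElem <;> simp [pvVec]
  intro t ht
  rw [List.getElem_set]
  split_ifs with h1 h2 <;> simp_all

theorem pvVec_succ (N : Nat) (f : Nat → Int) (k : Nat) (_hk : k < N) :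
    (pvVec N f k).set k (f k) = pvVec N f (k + 1) := by
  apply List.ext_getElem <;> simp [pvVec]
  intro t ht
  rw [List.getElem_set]
  split_ifs with h1 h2 h3 <;> simp_all <;> omega

theorem pvVec_getD (N : Nat) (f : Nat → Int) (j k : Nat) (hk : k < N) (hkj : k < j) :
    PySem.List.pyGetD (pvVec N f j) (k : Int) 0 = f k := by
  rw [PySem.List.pyGetD_natCast, List.getD_eq_getElem?_getD]
  simp [pvVec, hk, hkj]

theorem pv_inner (m : List (List Int)) (i : Nat) (r c : List Int)
    (hir : i < r.length) (hic : i < c.length) (L : List Int) :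
    ∀ (a b : Int),
      L.foldl (pvInnerA m (i : Int)) (r.set i a, c.set i b)
      = (r.set i (a + (L.map (fun j => PySem.List.pyGetD (PySem.List.pyGetD m (i : Int) []) j 0)).sum),
         c.set i (b + (L.map (fun j => PySem.List.pyGetD (PySem.List.pyGetD m j []) (i : Int) 0)).sum)) := by
  induction L with
  | nil => intro a b; simp
  | cons j t ih =>
    intro a b
    have step : pvInnerA m (i : Int) (r.set i a, c.set i b) j
        = (r.set i (a + PySem.List.pyGetD (PySem.List.pyGetD m (i : Int) []) j 0),
           c.set i (b + PySem.List.pyGetD (PySem.List.pyGetD m j []) (i : Int) 0)) := by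
      simp [pvInnerA, List.getD_eq_getElem?_getD, hir, hic, List.set_set]
    rw [List.foldl_cons, step, ih]
    simp [add_assoc]

theorem pv_outer (m : List (List Int)) (n : Int) (N : Nat) (hn : n = (N : Int)) :
    ∀ k, k ≤ N →
      (PySem.List.pyRange 0 (k : Int) 1).foldl (pvOuterA m n)
          (List.replicate N 0, List.replicate N 0, 0)
      = (pvVec N (pvR m N) k, pvVec N (pvC m N) k, pvT m N k) := by
  intro k
  induction k with
  | zero => intro _hk; simp [PySem.List.pyRange_one_eq_nil, pvT, pvVec_zero]
  | succ k ih =>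
    intro hk
    have hk' : k < N := by omega
    have hcast : ((k + 1 : Nat) : Int) = (k : Int) + 1 := by push_cast; ring
    rw [hcast, PySem.List.pyRange_one_succ_right (by positivity), List.foldl_append,
        ih (by omega)]
    simp only [List.foldl_cons, List.foldl_nil]
    have hinner :
        (PySem.List.pyRange 0 n 1).foldl (pvInnerA m (k : Int)) (pvVec N (pvR m N) k, pvVec N (pvC m N) k)
        = (pvVec N (pvR m N) (k + 1), pvVec N (pvC m N) (k + 1)) := by
      rw [← pvVec_set_zero N (pvR m N) k hk', ← pvVec_set_zero N (pvC m N) k hk',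
          pv_inner m k _ _ (by rw [pvVec_length]; exact hk') (by rw [pvVec_length]; exact hk'),
          hn, PySem.List.pyRange_zero_nat, List.map_map, List.map_map]
      simp only [Function.comp_def, zero_add]
      rw [show (List.map (fun x : Nat => PySem.List.pyGetD (PySem.List.pyGetD m (k : Int) []) (x : Int) 0) (List.range N)).sum = pvR m N k from rfl,
          show (List.map (fun x : Nat => PySem.List.pyGetD (PySem.List.pyGetD m (x : Int) []) (k : Int) 0) (List.range N)).sum = pvC m N k from rfl,
          pvVec_succ N (pvR m N) k hk', pvVec_succ N (pvC m N) k hk']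
    simp only [pvOuterA, hinner]
    rw [pvVec_getD N (pvC m N) (k + 1) k hk' (by omega), pvVec_getD N (pvR m N) (k + 1) k hk' (by omega)]
    simp [pvT]

-- a fold accumulating two running sums in a pair
theorem pv_pairfold {α : Type} (f g : α → Int) (L : List α) : ∀ (a b : Int),
    L.foldl (fun (p : Int × Int) j => (p.1 + f j, p.2 + g j)) (a, b)
    = (a + (L.map f).sum, b + (L.map g).sum) := by
  induction L with
  | nil => intro a b; simp
  | cons x t ih => intro a b; rw [List.foldl_cons, ih]; simp [add_assoc]

-- B's loop invariant: state after k iterations = (pvT k, k*pvT k - pvS k, k)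
theorem pv_stepB_inv (m : List (List Int)) (N : Nat) :
    ∀ k, k ≤ N →
      (PySem.List.pyRange 0 (k : Int) 1).foldl (pvStepB m ((N : Nat) : Int)) (0, 0, 0)
      = (pvT m N k, (k : Int) * pvT m N k - pvS m N k, (k : Int)) := by
  intro k
  induction k with
  | zero => intro _; simp [PySem.List.pyRange_one_eq_nil, pvT, pvS]
  | succ k ih =>
    intro hk
    have hcast : ((k + 1 : Nat) : Int) = (k : Int) + 1 := by push_cast; ring
    rw [hcast, PySem.List.pyRange_one_succ_right (by positivity), List.foldl_append,
        ih (by omega)]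
    simp only [List.foldl_cons, List.foldl_nil]
    have hrc :
        (PySem.List.pyRange 0 ((N : Nat) : Int) 1).foldl (fun (p : Int × Int) j =>
          (p.1 + PySem.List.pyGetD (PySem.List.pyGetD m ((k : Nat) : Int) []) j 0,
           p.2 + PySem.List.pyGetD (PySem.List.pyGetD m j []) ((k : Nat) : Int) 0)) (0, 0)
        = (pvR m N k, pvC m N k) := by
      rw [PySem.List.pyRange_zero_nat, List.foldl_map]
      simpa [pvR, pvC, pvE] using
        pv_pairfold (fun y : Nat => PySem.List.pyGetD (PySem.List.pyGetD m ((k : Nat) : Int) []) ((y : Nat) : Int) 0)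
          (fun y : Nat => PySem.List.pyGetD (PySem.List.pyGetD m ((y : Nat) : Int) []) ((k : Nat) : Int) 0)
          (List.range N) 0 0
    simp only [pvStepB, hrc]
    have hS : pvS m N (k + 1) = pvS m N k + pvC m N k := by
      simp [pvS, List.range_succ]
    have hT : pvT m N (k + 1)
        = if (if pvR m N k > pvC m N k then pvR m N k else pvC m N k) > pvT m N k
          then (if pvR m N k > pvC m N k then pvR m N k else pvC m N k) else pvT m N k := by
      simp only [pvT, max_def]
      split_ifs <;> omega
    rw [hT, hS]
    split_ifs with h <;>
      exact Prod.ext rfl (Prod.ext (by push_cast; ring) (by push_cast; ring))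

-- sum over a list of differences
theorem pv_sum_map_sub {α : Type} (xs : List α) (f g : α → Int) :
    (xs.map (fun x => f x - g x)).sum = (xs.map f).sum - (xs.map g).sum := by
  induction xs with
  | nil => simp
  | cons x t ih => simp [ih]; ring

-- ===== VERDICT (by name: the statement is the Claim_ definition above) =====
theorem findMinOpeartion_spec : Claim_equal_findMinOpeartion := by
  intro m n _ hpre
  unfold Spec_findMinOpeartion
  by_cases hn : n ≤ 0
  · simp [findMinOpeartion, findMinOpeartion_alt, PySem.List.pyRange_one_eq_nil hn]
  · rw [not_le] at hn
    obtain ⟨N, rfl⟩ : ∃ N : Nat, n = (N : Int) := ⟨n.toNat, by omega⟩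
    -- A's value
    simp only [findMinOpeartion, findMinOpeartion_alt, Int.toNat_natCast]
    rw [pv_outer m ((N : Nat) : Int) N rfl N le_rfl,
        pv_stepB_inv m N N le_rfl]
    simp only
    rw [PySem.List.pyRange_zero_nat, List.foldl_map]
    rw [show (fun (ans : Int) (k : Nat) => ans + (pvT m N N - PySem.List.pyGetD (pvVec N (pvC m N) N) ((k : Nat) : Int) 0))
          = (fun ans k => ans + (fun k : Nat => pvT m N N - PySem.List.pyGetD (pvVec N (pvC m N) N) ((k : Nat) : Int) 0) k) from rfl,
        PySem.List.foldl_add]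
    rw [List.map_congr_left (l := List.range N)
      (f := fun k : Nat => pvT m N N - PySem.List.pyGetD (pvVec N (pvC m N) N) ((k : Nat) : Int) 0)
      (g := fun k : Nat => pvT m N N - pvC m N k)
      (by
        intro k hk
        have hk' : k < N := List.mem_range.mp hk
        show pvT m N N - PySem.List.pyGetD (pvVec N (pvC m N) N) ((k : Nat) : Int) 0
          = pvT m N N - pvC m N k
        rw [pvVec_getD N (pvC m N) N k hk' hk'])]
    rw [pv_sum_map_sub, PySem.List.sum_map_const_int, List.length_range]
    show (0 : Int) + ((N : Int) * pvT m N N - pvS m N N) = (N : Int) * pvT m N N - pvS m N N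
    ring
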